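-- pv_equiv track=rewrite | github.com/savejobar/Work | Forecast/df_preprocessing.py | find_all_analogs
-- ===== SOURCE A (Python) =====
-- from typing import Optional, List, Iterable, Any, Dict, Set, Tuple
--
-- def find_all_analogs(start: Any, graph: Dict[Any, Set[Any]]) -> Tuple[Any, ...]:
--
--     visited = set()
--     stack = [start]
--
--     while stack:
--         node = stack.pop()
--         if node not in visited:
--             visited.add(node)
--             stack.extend(graph[node] - visited)
--
--     return tuple(sorted(visited))
-- ===== SOURCE B (Python) =====
-- def find_all_analogs(start, graph):
--     # Layered (frontier) saturation instead of an explicit DFS stack.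
--     visited = {start}
--     frontier = {start}
--     while frontier:
--         nxt = set()
--         for node in frontier:
--             nxt |= graph[node]
--         frontier = nxt - visited
--         visited |= frontier
--     return tuple(sorted(visited))
-- ===== Notes on version B (the rewrite author's own statement) =====
-- stated objective: alternative
-- what changed: Replaces the explicit DFS stack (pop one node, push its unvisited neighbours) by layered breadth-first saturation: expand the whole frontier at once with set unions until it is empty.
-- outside the precondition, e.g. on find_all_analogs('a', {'a': set(), 'b': {'c'}}): A returns ('a',), B returns ('a',)
import Mathlib
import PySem

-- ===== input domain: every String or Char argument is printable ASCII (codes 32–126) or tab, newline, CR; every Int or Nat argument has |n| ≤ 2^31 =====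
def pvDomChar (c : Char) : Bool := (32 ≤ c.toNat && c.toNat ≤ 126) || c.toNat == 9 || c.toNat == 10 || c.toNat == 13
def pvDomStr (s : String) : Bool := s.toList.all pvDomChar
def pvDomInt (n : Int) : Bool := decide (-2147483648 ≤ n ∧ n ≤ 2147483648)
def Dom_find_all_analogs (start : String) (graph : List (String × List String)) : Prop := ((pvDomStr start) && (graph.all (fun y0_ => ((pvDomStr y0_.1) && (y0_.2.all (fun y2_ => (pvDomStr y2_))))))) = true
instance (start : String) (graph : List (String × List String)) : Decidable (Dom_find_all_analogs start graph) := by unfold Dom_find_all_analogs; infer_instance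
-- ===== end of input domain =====

-- B replaces A's explicit DFS stack by layered breadth-first saturation of the visited set; same result (the sorted reachable set), similar cost ('alternative').
-- ===== PORT A =====
-- shared graph lookup: graph[node] with KeyError modeled as the default [] (Pre_ excludes the raising inputs)
def pvAdj (graph : List (String × List String)) (node : String) : List String :=
  PySem.Dict.getD (PySem.Dict.ofList graph) node []

theorem pvAdj_mem_items (graph : List (String × List String)) (node y : String)
    (hy : y ∈ pvAdj graph node) :
    ∃ p ∈ (PySem.Dict.ofList graph).items, y ∈ p.2 := by
  unfold pvAdj at hy
  cases hg : (PySem.Dict.ofList graph).get? node with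
  | none => rw [PySem.Dict.getD_of_get?_eq_none _ _ hg] at hy; simp at hy
  | some v =>
    rw [PySem.Dict.getD_of_get?_eq_some _ _ hg] at hy
    exact ⟨(node, v), PySem.Dict.mem_items_of_get?_eq_some _ hg, hy⟩

-- filter-length lemma used by both ports' termination proofs (cited in decreasing_by)
theorem pv_filter_len_lt {α} (p q : α → Bool) (h : ∀ x, q x = true → p x = true) :
    ∀ (l : List α) (a : α), a ∈ l → p a = true → q a = false →
    (l.filter q).length < (l.filter p).length := by
  intro l
  induction l with
  | nil => intro a ha _ _; simp at ha
  | cons x t ih =>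
    intro a ha hp hq
    have hle : (t.filter q).length ≤ (t.filter p).length :=
      List.Sublist.length_le (List.monotone_filter_right t (by intro y hy; exact h y hy))
    rcases List.mem_cons.mp ha with heq | ha'
    · subst heq
      simp [hp, hq]; omega
    · have hlt := ih a ha' hp hq
      by_cases hpx : p x = true <;> by_cases hqx : q x = true
      · simp [hpx, hqx]; omega
      · simp [hpx, hqx]; omega
      · exact absurd (h x hqx) (by simp [hpx])
      · simp [hpx, hqx]; omega


theorem pv_items_ofList_subset (l : List (String × List String)) :
    ∀ p ∈ (PySem.Dict.ofList l).items, p ∈ l := by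
  have key : ∀ (l : List (String × List String)) (d : PySem.Dict String (List String)),
      ∀ p ∈ (l.foldl (fun d q => d.insert q.1 q.2) d).items, p ∈ d.items ∨ p ∈ l := by
    intro l
    induction l with
    | nil => intro d p hp; exact Or.inl hp
    | cons q t ih =>
      intro d p hp
      rcases ih (d.insert q.1 q.2) p hp with h1 | h2
      · rcases (PySem.Dict.mem_items_insert _ _ _ _).mp h1 with h3 | h4
        · right; rw [h3]; exact List.mem_cons_self ..
        · exact Or.inl h4.1
      · right; exact List.mem_cons_of_mem _ h2
  intro p hp
  have hofl : PySem.Dict.ofList l = l.foldl (fun d q => d.insert q.1 q.2) PySem.Dict.empty := rfl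
  rw [hofl] at hp
  rcases key l PySem.Dict.empty p hp with h | h
  · simp [PySem.Dict.empty] at h
  · exact h

-- A's worklist loop: pop a node, mark it visited, push its unvisited neighbours (stack kept top-first: Python's list end is the head here)
def pvLoopA (graph : List (String × List String)) (U : List String)
    (hU : ∀ p ∈ (PySem.Dict.ofList graph).items, ∀ y ∈ p.2, y ∈ U)
    (visited : PySem.Set String) (stack : List String)
    (hs : ∀ x ∈ stack, x ∈ U) : PySem.Set String :=
  match stack with
  | [] => visited
  | node :: rest =>
    if hv : node ∈ visited then
      pvLoopA graph U hU visited rest (fun x hx => hs x (List.mem_cons_of_mem _ hx))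
    else
      pvLoopA graph U hU (PySem.Set.add visited node)
        (((pvAdj graph node).filter
            (fun y => !decide (y ∈ PySem.Set.add visited node))).reverse ++ rest)
        (by
          intro x hx
          rcases List.mem_append.mp hx with hx1 | hx2
          · have hx3 : x ∈ pvAdj graph node := by
              have := List.mem_reverse.mp hx1
              exact (List.mem_filter.mp this).1
            obtain ⟨p, hp, hyp⟩ := pvAdj_mem_items graph node x hx3
            exact hU p hp x hyp
          · exact hs x (List.mem_cons_of_mem _ hx2))
termination_by ((U.filter (fun u => !decide (u ∈ visited))).length, stack.length)
decreasing_by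
  · apply Prod.Lex.right
    simp
  · apply Prod.Lex.left
    apply pv_filter_len_lt _ _ ?_ U node (hs node (List.mem_cons_self ..))
    · simp [hv]
    · simp [PySem.Set.mem_add]
    · intro x hx
      simp only [Bool.not_eq_true', decide_eq_false_iff_not] at hx ⊢
      intro hmem
      exact hx ((PySem.Set.mem_add _ _ _).mpr (Or.inl hmem))
theorem pvU_spec (start : String) (graph : List (String × List String)) :
    ∀ p ∈ (PySem.Dict.ofList graph).items, ∀ y ∈ p.2,
      y ∈ start :: graph.flatMap (fun q => q.2) := by
  intro p hp y hy
  exact List.mem_cons_of_mem _ (List.mem_flatMap.mpr ⟨p, pv_items_ofList_subset graph p hp, hy⟩)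

def find_all_analogs (start : String) (graph : List (String × List String)) : List String :=
  PySem.List.sorted
    (pvLoopA graph (start :: graph.flatMap (fun q => q.2)) (pvU_spec start graph)
      PySem.Set.empty [start]
      (by intro x hx; rw [List.mem_singleton] at hx; exact hx ▸ List.mem_cons_self ..))
    (fun x => x) false


-- ===== PORT B =====
theorem pv_mem_foldl_update (graph : List (String × List String)) :
    ∀ (l : List String) (s : PySem.Set String) (y : String),
    y ∈ l.foldl (fun acc n => PySem.Set.update acc (pvAdj graph n)) s ↔
      y ∈ s ∨ ∃ n ∈ l, y ∈ pvAdj graph n := by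
  intro l
  induction l with
  | nil => intro s y; simp
  | cons x t ih =>
    intro s y
    simp only [List.foldl_cons, ih, PySem.Set.mem_update]
    constructor
    · rintro ((h | h) | ⟨n, hn, hy⟩)
      · exact Or.inl h
      · exact Or.inr ⟨x, List.mem_cons_self .., h⟩
      · exact Or.inr ⟨n, List.mem_cons_of_mem _ hn, hy⟩
    · rintro (h | ⟨n, hn, hy⟩)
      · exact Or.inl (Or.inl h)
      · rcases List.mem_cons.mp hn with heq | hmem
        · exact Or.inl (Or.inr (heq ▸ hy))
        · exact Or.inr ⟨n, hmem, hy⟩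

-- B's loop: expand the whole frontier at once (nxt = union of graph[node]), new frontier = nxt - visited, visited |= frontier
def pvLoopB (graph : List (String × List String)) (U : List String)
    (hU : ∀ p ∈ (PySem.Dict.ofList graph).items, ∀ y ∈ p.2, y ∈ U)
    (visited frontier : PySem.Set String) : PySem.Set String :=
  if hemp : frontier = [] then visited
  else
    pvLoopB graph U hU
      (PySem.Set.update visited
        (PySem.Set.diff
          (frontier.foldl (fun acc n => PySem.Set.update acc (pvAdj graph n)) PySem.Set.empty)
          visited))
      (PySem.Set.diff
        (frontier.foldl (fun acc n => PySem.Set.update acc (pvAdj graph n)) PySem.Set.empty)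
        visited)
termination_by ((U.filter (fun u => !decide (u ∈ visited))).length, frontier.length)
decreasing_by
  simp only [List.foldl_subtype, List.unattach_attach]
  cases hne : PySem.Set.diff
      (frontier.foldl (fun acc n => PySem.Set.update acc (pvAdj graph n)) PySem.Set.empty)
      visited with
  | nil =>
    rw [PySem.Set.update_nil]
    apply Prod.Lex.right
    simpa using List.length_pos_of_ne_nil hemp
  | cons y t =>
    apply Prod.Lex.left
    have hy : y ∈ PySem.Set.diff
        (frontier.foldl (fun acc n => PySem.Set.update acc (pvAdj graph n)) PySem.Set.empty)
        visited := by rw [hne]; exact List.mem_cons_self ..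
    have hyd := (PySem.Set.mem_diff _ _ _).mp hy
    have hyU : y ∈ U := by
      rcases (pv_mem_foldl_update graph frontier PySem.Set.empty y).mp hyd.1 with h | ⟨n, _, hadj⟩
      · simp [PySem.Set.empty] at h
      · obtain ⟨p, hp, hyp⟩ := pvAdj_mem_items graph n y hadj
        exact hU p hp y hyp
    apply pv_filter_len_lt _ _ ?_ U y hyU
    · simp [hyd.2]
    · simp only [Bool.not_eq_false', decide_eq_true_iff]
      exact (PySem.Set.mem_update _ _ _).mpr (Or.inr (List.mem_cons_self ..))
    · intro x hx
      simp only [Bool.not_eq_true', decide_eq_false_iff_not] at hx ⊢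
      intro hmem
      exact hx ((PySem.Set.mem_update _ _ _).mpr (Or.inl hmem))
def find_all_analogs_alt (start : String) (graph : List (String × List String)) : List String :=
  PySem.List.sorted
    (pvLoopB graph (start :: graph.flatMap (fun q => q.2)) (pvU_spec start graph)
      (PySem.Set.ofList [start]) (PySem.Set.ofList [start]))
    (fun x => x) false


-- ===== PRECONDITION & SPEC =====
-- Pre_ restricts to closed graphs (start and every listed neighbour are dict keys): elsewhere A raises KeyError at any
-- reachable non-key node; A does still return when every missing neighbour is unreachable — those inputs are excluded
-- too, since whether A returns there depends on reachability, not on the input's shape (example cited in claim.json).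
def Pre_find_all_analogs (start : String) (graph : List (String × List String)) : Prop :=
  start ∈ (PySem.Dict.ofList graph).keys ∧
  ∀ p ∈ (PySem.Dict.ofList graph).items, ∀ v ∈ p.2, v ∈ (PySem.Dict.ofList graph).keys
instance (start : String) (graph : List (String × List String)) : Decidable (Pre_find_all_analogs start graph) := by unfold Pre_find_all_analogs; infer_instance

def pvWitness_find_all_analogs : String × (List (String × List String)) :=
  ("a", [("a", ["b"]), ("b", [])])

def Spec_find_all_analogs (start : String) (graph : List (String × List String)) (out : List String) : Prop := out = find_all_analogs_alt start graph
instance (start : String) (graph : List (String × List String)) (out : List String) : Decidable (Spec_find_all_analogs start graph out) := by unfold Spec_find_all_analogs; infer_instance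

-- ===== CLAIM (what is proved, stated in full; the proofs are below) =====
def Claim_equal_find_all_analogs : Prop := ∀ (start : String) (graph : List (String × List String)), Dom_find_all_analogs start graph → Pre_find_all_analogs start graph → Spec_find_all_analogs start graph (find_all_analogs start graph)

-- ===== LEMMAS AND PROOFS =====
def pvReach (graph : List (String × List String)) (s x : String) : Prop :=
  Relation.ReflTransGen (fun a b => b ∈ pvAdj graph a) s x

theorem pvLoopA_char (graph : List (String × List String)) (U : List String)
    (hU : ∀ p ∈ (PySem.Dict.ofList graph).items, ∀ y ∈ p.2, y ∈ U) :
    ∀ (visited : PySem.Set String) (stack : List String)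
      (hs : ∀ x ∈ stack, x ∈ U),
      visited.Nodup →
      (∀ v ∈ visited, ∀ y ∈ pvAdj graph v, y ∈ visited ∨ y ∈ stack) →
      (pvLoopA graph U hU visited stack hs).Nodup ∧
      (∀ x ∈ visited, x ∈ pvLoopA graph U hU visited stack hs) ∧
      (∀ x ∈ stack, x ∈ pvLoopA graph U hU visited stack hs) ∧
      (∀ v ∈ pvLoopA graph U hU visited stack hs, ∀ y ∈ pvAdj graph v,
        y ∈ pvLoopA graph U hU visited stack hs) ∧
      (∀ x ∈ pvLoopA graph U hU visited stack hs,
        x ∈ visited ∨ ∃ n ∈ stack, pvReach graph n x) := by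
  intro visited stack hs hnd hinv
  revert hnd hinv
  fun_induction pvLoopA graph U hU visited stack hs with
  | case1 visited hs =>
    intro hnd hinv
    refine ⟨hnd, fun x hx => hx, by simp, ?_, fun x hx => Or.inl hx⟩
    intro v hv y hy
    rcases hinv v hv y hy with h | h
    · exact h
    · simp at h
  | case2 visited node rest hs hv hs2 ih =>
    intro hnd hinv
    have hinv' : ∀ v ∈ visited, ∀ y ∈ pvAdj graph v, y ∈ visited ∨ y ∈ rest := by
      intro v hvv y hy
      rcases hinv v hvv y hy with h | h
      · exact Or.inl h
      · rcases List.mem_cons.mp h with heq | hm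
        · exact Or.inl (heq ▸ hv)
        · exact Or.inr hm
    obtain ⟨ih1, ih2, ih3, ih4, ih5⟩ := ih hnd hinv'
    refine ⟨ih1, ih2, ?_, ih4, ?_⟩
    · intro x hx
      rcases List.mem_cons.mp hx with heq | hm
      · subst heq
        exact ih2 x hv
      · exact ih3 x hm
    · intro x hx
      rcases ih5 x hx with h | ⟨n, hn, hr⟩
      · exact Or.inl h
      · exact Or.inr ⟨n, List.mem_cons_of_mem _ hn, hr⟩
  | case3 visited node rest hs hv hs2 ih =>
    intro hnd hinv
    have hnd' : (PySem.Set.add visited node).Nodup := PySem.Set.nodup_add _ _ hnd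
    have hinv' : ∀ v ∈ PySem.Set.add visited node, ∀ y ∈ pvAdj graph v,
        y ∈ PySem.Set.add visited node ∨
        y ∈ ((pvAdj graph node).filter
              (fun y => !decide (y ∈ PySem.Set.add visited node))).reverse ++ rest := by
      intro v hvv y hy
      rcases (PySem.Set.mem_add _ _ _).mp hvv with hvm | heq
      · rcases hinv v hvm y hy with h | h
        · exact Or.inl ((PySem.Set.mem_add _ _ _).mpr (Or.inl h))
        · rcases List.mem_cons.mp h with heq2 | hm
          · exact Or.inl ((PySem.Set.mem_add _ _ _).mpr (Or.inr heq2))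
          · exact Or.inr (List.mem_append.mpr (Or.inr hm))
      · subst heq
        by_cases hyv : y ∈ PySem.Set.add visited v
        · exact Or.inl hyv
        · refine Or.inr (List.mem_append.mpr (Or.inl (List.mem_reverse.mpr
            (List.mem_filter.mpr ⟨hy, by simp [hyv]⟩))))
    obtain ⟨ih1, ih2, ih3, ih4, ih5⟩ := ih hnd' hinv'
    refine ⟨ih1, ?_, ?_, ih4, ?_⟩
    · intro x hx
      exact ih2 x ((PySem.Set.mem_add _ _ _).mpr (Or.inl hx))
    · intro x hx
      rcases List.mem_cons.mp hx with heq | hm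
      · subst heq
        exact ih2 x ((PySem.Set.mem_add _ _ _).mpr (Or.inr rfl))
      · exact ih3 x (List.mem_append.mpr (Or.inr hm))
    · intro x hx
      rcases ih5 x hx with h | ⟨n, hn, hr⟩
      · rcases (PySem.Set.mem_add _ _ _).mp h with h1 | h2
        · exact Or.inl h1
        · exact Or.inr ⟨node, List.mem_cons_self .., by subst h2; exact Relation.ReflTransGen.refl⟩
      · rcases List.mem_append.mp hn with h1 | h2
        · have hadj : n ∈ pvAdj graph node := (List.mem_filter.mp (List.mem_reverse.mp h1)).1
          exact Or.inr ⟨node, List.mem_cons_self ..,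
            Relation.ReflTransGen.trans (Relation.ReflTransGen.single hadj) hr⟩
        · exact Or.inr ⟨n, List.mem_cons_of_mem _ h2, hr⟩

theorem pvLoopB_char (graph : List (String × List String)) (U : List String)
    (hU : ∀ p ∈ (PySem.Dict.ofList graph).items, ∀ y ∈ p.2, y ∈ U) :
    ∀ (visited frontier : PySem.Set String),
      visited.Nodup →
      (∀ x ∈ frontier, x ∈ visited) →
      (∀ v ∈ visited, v ∉ frontier → ∀ y ∈ pvAdj graph v, y ∈ visited) →
      (pvLoopB graph U hU visited frontier).Nodup ∧
      (∀ x ∈ visited, x ∈ pvLoopB graph U hU visited frontier) ∧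
      (∀ v ∈ pvLoopB graph U hU visited frontier, ∀ y ∈ pvAdj graph v,
        y ∈ pvLoopB graph U hU visited frontier) ∧
      (∀ x ∈ pvLoopB graph U hU visited frontier, ∃ n ∈ visited, pvReach graph n x) := by
  intro visited frontier hnd hsub hclo
  revert hnd hsub hclo
  fun_induction pvLoopB graph U hU visited frontier with
  | case1 visited =>
    intro hnd hsub hclo
    refine ⟨hnd, fun x hx => hx, ?_, fun x hx => ⟨x, hx, Relation.ReflTransGen.refl⟩⟩
    intro v hv y hy
    exact hclo v hv (List.not_mem_nil) y hy
  | case2 visited frontier hemp ih =>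
    intro hnd hsub hclo
    try simp only [List.foldl_subtype, List.unattach_attach] at ih ⊢
    have hnd' := PySem.Set.nodup_update visited
      (PySem.Set.diff
        (frontier.foldl (fun acc n => PySem.Set.update acc (pvAdj graph n)) PySem.Set.empty)
        visited) hnd
    have hsub' : ∀ x ∈ PySem.Set.diff
        (frontier.foldl (fun acc n => PySem.Set.update acc (pvAdj graph n)) PySem.Set.empty)
        visited,
        x ∈ PySem.Set.update visited
          (PySem.Set.diff
            (frontier.foldl (fun acc n => PySem.Set.update acc (pvAdj graph n)) PySem.Set.empty)
            visited) := by
      intro x hx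
      exact (PySem.Set.mem_update _ _ _).mpr (Or.inr hx)
    have hclo' : ∀ v ∈ PySem.Set.update visited
        (PySem.Set.diff
          (frontier.foldl (fun acc n => PySem.Set.update acc (pvAdj graph n)) PySem.Set.empty)
          visited),
        v ∉ PySem.Set.diff
          (frontier.foldl (fun acc n => PySem.Set.update acc (pvAdj graph n)) PySem.Set.empty)
          visited →
        ∀ y ∈ pvAdj graph v,
          y ∈ PySem.Set.update visited
            (PySem.Set.diff
              (frontier.foldl (fun acc n => PySem.Set.update acc (pvAdj graph n)) PySem.Set.empty)
              visited) := by
      intro v hv hnf y hy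
      rcases (PySem.Set.mem_update _ _ _).mp hv with hvm | hvf
      · by_cases hvfr : v ∈ frontier
        · have hynxt : y ∈ frontier.foldl (fun acc n => PySem.Set.update acc (pvAdj graph n))
              PySem.Set.empty :=
            (pv_mem_foldl_update graph frontier PySem.Set.empty y).mpr (Or.inr ⟨v, hvfr, hy⟩)
          by_cases hyv : y ∈ visited
          · exact (PySem.Set.mem_update _ _ _).mpr (Or.inl hyv)
          · exact (PySem.Set.mem_update _ _ _).mpr
              (Or.inr ((PySem.Set.mem_diff _ _ _).mpr ⟨hynxt, hyv⟩))
        · exact (PySem.Set.mem_update _ _ _).mpr (Or.inl (hclo v hvm hvfr y hy))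
      · exact absurd hvf hnf
    obtain ⟨ih1, ih2, ih3, ih4⟩ := ih hnd' hsub' hclo'
    refine ⟨ih1, ?_, ih3, ?_⟩
    · intro x hx
      exact ih2 x ((PySem.Set.mem_update _ _ _).mpr (Or.inl hx))
    · intro x hx
      obtain ⟨n, hn, hr⟩ := ih4 x hx
      rcases (PySem.Set.mem_update _ _ _).mp hn with h1 | h2
      · exact ⟨n, h1, hr⟩
      · have hnxt := ((PySem.Set.mem_diff _ _ _).mp h2).1
        rcases (pv_mem_foldl_update graph frontier PySem.Set.empty n).mp hnxt with h | ⟨m, hm, hadj⟩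
        · simp [PySem.Set.empty] at h
        · exact ⟨m, hsub m hm,
            Relation.ReflTransGen.trans (Relation.ReflTransGen.single hadj) hr⟩

theorem pv_memA (start : String) (graph : List (String × List String)) (x : String)
    (hs : ∀ y ∈ [start], y ∈ start :: graph.flatMap (fun q => q.2)) :
    x ∈ pvLoopA graph (start :: graph.flatMap (fun q => q.2)) (pvU_spec start graph)
        PySem.Set.empty [start] hs ↔ pvReach graph start x := by
  obtain ⟨h1, h2, h3, h4, h5⟩ := pvLoopA_char graph (start :: graph.flatMap (fun q => q.2))
    (pvU_spec start graph) PySem.Set.empty [start] hs (by simp [PySem.Set.empty])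
    (by intro v hv; simp [PySem.Set.empty] at hv)
  constructor
  · intro hx
    rcases h5 x hx with h | ⟨n, hn, hr⟩
    · simp [PySem.Set.empty] at h
    · rw [List.mem_singleton] at hn
      exact hn ▸ hr
  · intro hr
    induction hr with
    | refl => exact h3 start (List.mem_singleton.mpr rfl)
    | tail _ hbc ihm => exact h4 _ ihm _ hbc

theorem pv_memB (start : String) (graph : List (String × List String)) (x : String) :
    x ∈ pvLoopB graph (start :: graph.flatMap (fun q => q.2)) (pvU_spec start graph)
        (PySem.Set.ofList [start]) (PySem.Set.ofList [start]) ↔ pvReach graph start x := by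
  obtain ⟨h1, h2, h3, h4⟩ := pvLoopB_char graph (start :: graph.flatMap (fun q => q.2))
    (pvU_spec start graph) (PySem.Set.ofList [start]) (PySem.Set.ofList [start])
    (PySem.Set.nodup_ofList _) (fun x hx => hx)
    (by
      intro v hv hnv
      exact absurd hv hnv)
  constructor
  · intro hx
    obtain ⟨n, hn, hr⟩ := h4 x hx
    have : n = start := by
      have := (PySem.Set.mem_ofList _ _).mp hn
      simpa using this
    exact this ▸ hr
  · intro hr
    induction hr with
    | refl => exact h2 start ((PySem.Set.mem_ofList _ _).mpr (by simp))
    | tail _ hbc ihm => exact h3 _ ihm _ hbc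

theorem pv_main (start : String) (graph : List (String × List String)) :
    find_all_analogs start graph = find_all_analogs_alt start graph := by
  unfold find_all_analogs find_all_analogs_alt
  apply PySem.List.sorted_eq_sorted_of_perm _ _ _ (fun a b h => h)
  apply (List.perm_ext_iff_of_nodup ?_ ?_).mpr
  · intro a
    rw [pv_memA, pv_memB]
  · exact (pvLoopA_char graph _ _ PySem.Set.empty [start] _ (by simp [PySem.Set.empty])
      (by intro v hv; simp [PySem.Set.empty] at hv)).1
  · exact (pvLoopB_char graph _ _ (PySem.Set.ofList [start]) (PySem.Set.ofList [start])
      (PySem.Set.nodup_ofList _) (fun x hx => hx)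
      (by intro v hv hnv; exact absurd hv hnv)).1

-- ===== VERDICT (by name: the statement is the Claim_ definition above) =====
theorem find_all_analogs_spec : Claim_equal_find_all_analogs := by
  intro start graph _ _
  unfold Spec_find_all_analogs
  exact pv_main start graph
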